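-- pv_equiv track=rewrite | github.com/godelclaw/ai-agents | megalodon/ramsey36/gen_adj17_reconstruct_alt.py | or_intro_steps
-- ===== SOURCE A (Python) =====
-- def or_intro_steps(length, index):
--     """
--     Steps (`apply orIL.` / `apply orIR.`) needed to introduce the disjunct at
--     `index` in a left-associated `length`-ary disjunction.
--     """
--     steps = []
--     k = length
--     idx = index
--     while k > 1:
--         if idx == k - 1:
--             steps.append("apply orIR.")
--             break
--         steps.append("apply orIL.")
--         k -= 1
--     return steps
-- ===== SOURCE B (Python) =====
-- def or_intro_steps(length, index):
--     if 0 < index < length: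
--         return ["apply orIL."] * (length - 1 - index) + ["apply orIR."]
--     return ["apply orIL."] * max(length - 1, 0)
-- ===== Notes on version B (the rewrite author's own statement) =====
-- stated objective: simpler
-- what changed: Replaced the countdown loop with a closed form: length-1-index copies of 'apply orIL.' plus one 'apply orIR.' when 0 < index < length, otherwise max(length-1,0) copies of 'apply orIL.'.
import Mathlib
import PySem

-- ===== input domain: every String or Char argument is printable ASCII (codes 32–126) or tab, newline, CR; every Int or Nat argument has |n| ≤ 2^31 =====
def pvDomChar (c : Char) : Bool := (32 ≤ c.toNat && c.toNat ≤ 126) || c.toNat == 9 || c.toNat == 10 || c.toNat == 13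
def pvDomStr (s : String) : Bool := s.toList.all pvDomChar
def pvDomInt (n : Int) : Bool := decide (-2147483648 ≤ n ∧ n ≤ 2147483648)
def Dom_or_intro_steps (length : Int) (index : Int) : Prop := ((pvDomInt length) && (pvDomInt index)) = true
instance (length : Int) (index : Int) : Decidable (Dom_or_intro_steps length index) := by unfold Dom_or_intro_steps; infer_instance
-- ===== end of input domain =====

-- B replaces A's countdown loop by a closed form (replicate + one if); objective: simpler.

-- ===== PORT A =====
-- literal port of A's while-loop: state (steps, k); idx never changes
def orIntroLoopA (steps : List String) (k : Int) (idx : Int) : List String :=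
  if _h : k > 1 then
    if idx = k - 1 then steps ++ ["apply orIR."]
    else orIntroLoopA (steps ++ ["apply orIL."]) (k - 1) idx
  else steps
termination_by k.toNat
decreasing_by omega

def or_intro_steps (length : Int) (index : Int) : List String :=
  orIntroLoopA [] length index

-- ===== PORT B =====
def or_intro_steps_alt (length : Int) (index : Int) : List String :=
  if 0 < index ∧ index < length then
    List.replicate (length - 1 - index).toNat "apply orIL." ++ ["apply orIR."]
  else
    List.replicate (max (length - 1) 0).toNat "apply orIL."

-- ===== PRECONDITION & SPEC =====
def Spec_or_intro_steps (length : Int) (index : Int) (out : List String) : Prop := out = or_intro_steps_alt length index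
instance (length : Int) (index : Int) (out : List String) : Decidable (Spec_or_intro_steps length index out) := by unfold Spec_or_intro_steps; infer_instance

-- ===== CLAIM (what is proved, stated in full; the proofs are below) =====
def Claim_equal_or_intro_steps : Prop := ∀ (length : Int) (index : Int), Dom_or_intro_steps length index → Spec_or_intro_steps length index (or_intro_steps length index)

-- ===== LEMMAS AND PROOFS =====

-- characterisation of A's loop, by induction on k.toNat
theorem orIntroLoopA_eq (n : Nat) : ∀ (steps : List String) (k idx : Int), k.toNat = n →
    orIntroLoopA steps k idx =
      steps ++ (if 0 < idx ∧ idx < k then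
        List.replicate (k - 1 - idx).toNat "apply orIL." ++ ["apply orIR."]
      else
        List.replicate (k - 1).toNat "apply orIL.") := by
  induction n with
  | zero =>
    intro steps k idx hk
    rw [orIntroLoopA]
    have hk1 : ¬ k > 1 := by omega
    simp only [hk1, dite_false]
    have : ¬ (0 < idx ∧ idx < k) := by omega
    simp [this, Int.toNat_of_nonpos (by omega : k - 1 ≤ 0)]
  | succ n ih =>
    intro steps k idx hk
    rw [orIntroLoopA]
    by_cases hk1 : k > 1
    · simp only [hk1, dite_true]
      by_cases hidx : idx = k - 1
      · have hc : 0 < idx ∧ idx < k := by omega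
        have h0 : (k - 1 - idx).toNat = 0 := by omega
        rw [if_pos hidx, if_pos hc, h0, List.replicate_zero, List.nil_append]
      · rw [if_neg hidx, ih (steps ++ ["apply orIL."]) (k - 1) idx (by omega)]
        by_cases hc : 0 < idx ∧ idx < k
        · have hc' : 0 < idx ∧ idx < k - 1 := by omega
          have hrep : (k - 1 - idx).toNat = ((k - 1) - 1 - idx).toNat + 1 := by omega
          rw [if_pos hc, if_pos hc', hrep, List.replicate_succ]
          simp [List.append_assoc]
        · have hc' : ¬ (0 < idx ∧ idx < k - 1) := by omega
          have hrep : (k - 1).toNat = ((k - 1) - 1).toNat + 1 := by omega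
          rw [if_neg hc, if_neg hc', hrep, List.replicate_succ]
          simp [List.append_assoc]
    · simp only [hk1, dite_false]
      have : ¬ (0 < idx ∧ idx < k) := by omega
      simp [this, Int.toNat_of_nonpos (by omega : k - 1 ≤ 0)]

-- ===== VERDICT (by name: the statement is the Claim_ definition above) =====
theorem or_intro_steps_spec : Claim_equal_or_intro_steps := by
  intro length index _
  unfold Spec_or_intro_steps or_intro_steps or_intro_steps_alt
  rw [orIntroLoopA_eq length.toNat [] length index rfl]
  have : (max (length - 1) 0).toNat = (length - 1).toNat := by omega
  simp [this]
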